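-- pv_equiv track=rewrite | github.com/drizztSun/common_project | PythonLeetcode/leetcodeM/846_HandOfStraights.py | doit_search
-- ===== SOURCE A (Python) =====
-- def doit_search(hand: list, W: int) -> bool:
--
--     if len(hand) % W != 0:
--         return False
--
--     cnt = {}
--     for c in hand:
--         cnt[c] = cnt.get(c, 0) + 1
--
--     while cnt:
--         c = min(cnt)
--         for i in range(c, c + W):
--             if cnt.get(i, 0) == 0:
--                 return False
--             cnt[i] -= 1
--             if cnt[i] == 0:
--                 del cnt[i]
--
--     return True
-- ===== SOURCE B (Python) =====
-- def doit_search(hand: list, W: int) -> bool: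
--
--     if len(hand) % W != 0:
--         return False
--
--     cnt = {}
--     for c in hand:
--         cnt[c] = cnt.get(c, 0) + 1
--
--     for x in sorted(cnt):
--         need = cnt[x]
--         if need > 0:
--             for i in range(x, x + W):
--                 if cnt.get(i, 0) < need:
--                     return False
--                 cnt[i] -= need
--
--     return True
-- ===== Notes on version B (the rewrite author's own statement) =====
-- stated objective: alternative
-- what changed: A repeatedly recomputes min(cnt) and peels off one W-run at a time, decrementing counts by 1 and deleting exhausted keys; B sorts the distinct values once and consumes each value's full remaining count in a single bulk subtraction over its window, with no min recomputation and no deletions.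
import Mathlib
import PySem

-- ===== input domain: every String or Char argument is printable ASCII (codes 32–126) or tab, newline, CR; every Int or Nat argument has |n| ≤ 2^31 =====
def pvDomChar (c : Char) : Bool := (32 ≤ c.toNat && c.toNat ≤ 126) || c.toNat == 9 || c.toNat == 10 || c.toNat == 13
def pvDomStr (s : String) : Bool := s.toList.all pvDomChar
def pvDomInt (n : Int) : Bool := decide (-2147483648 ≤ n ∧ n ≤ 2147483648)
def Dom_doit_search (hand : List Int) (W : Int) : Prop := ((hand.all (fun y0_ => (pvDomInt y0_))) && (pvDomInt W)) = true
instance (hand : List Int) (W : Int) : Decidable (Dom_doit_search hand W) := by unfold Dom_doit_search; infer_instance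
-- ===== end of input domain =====

-- B replaces A's repeated min-of-dict extraction of one W-run at a time by a single pass
-- over the sorted distinct values that consumes each value's whole remaining count at once.

-- ===== PORT A =====
-- cnt = {}; for c in hand: cnt[c] = cnt.get(c, 0) + 1   (this loop is verbatim in A and B)
def pvBuildCnt (hand : List Int) : PySem.Dict Int Int :=
  hand.foldl (fun d c => d.insert c (d.getD c 0 + 1)) PySem.Dict.empty

-- for i in range(c, c+W): if cnt.get(i,0)==0: return False; cnt[i]-=1; if cnt[i]==0: del cnt[i]
def pvInnerA (cnt : PySem.Dict Int Int) : List Int → Option (PySem.Dict Int Int)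
  | [] => some cnt
  | i :: rest =>
    if cnt.getD i 0 = 0 then none
    else
      let cnt1 := cnt.insert i (cnt.getD i 0 - 1)
      if cnt1.getD i 0 = 0 then pvInnerA (cnt1.erase i) rest
      else pvInnerA cnt1 rest

-- while cnt: c = min(cnt); <inner for loop>   (fuel only bounds the recursion: on every
-- input admitted by Pre_ the while loop runs at most len(hand) times, proved below)
def pvLoopA (W : Int) : Nat → PySem.Dict Int Int → Bool
  | 0, _ => true
  | fuel+1, cnt =>
    match PySem.List.min? cnt.keys (fun k => k) with
    | none => true
    | some c =>
      match pvInnerA cnt (PySem.List.pyRange c (c + W) 1) with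
      | none => false
      | some cnt' => pvLoopA W fuel cnt'

-- W = 0 makes len(hand) % W raise ZeroDivisionError in Python: mod? is none there (outside Pre_)
def doit_search (hand : List Int) (W : Int) : Bool :=
  match PySem.Int.mod? (hand.length : Int) W with
  | none => false
  | some r =>
    if r ≠ 0 then false
    else pvLoopA W (hand.length + 1) (pvBuildCnt hand)

-- ===== PORT B =====
-- for i in range(x, x+W): if cnt.get(i,0) < need: return False; cnt[i] -= need
def pvInnerB (need : Int) (cnt : PySem.Dict Int Int) : List Int → Option (PySem.Dict Int Int)
  | [] => some cnt
  | i :: rest =>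
    if cnt.getD i 0 < need then none
    else pvInnerB need (cnt.insert i (cnt.getD i 0 - need)) rest

-- for x in sorted(cnt): need = cnt[x]; if need > 0: <inner for loop>
def pvLoopB (W : Int) : PySem.Dict Int Int → List Int → Bool
  | _, [] => true
  | cnt, x :: rest =>
    let need := cnt.getD x 0
    if 0 < need then
      match pvInnerB need cnt (PySem.List.pyRange x (x + W) 1) with
      | none => false
      | some cnt' => pvLoopB W cnt' rest
    else pvLoopB W cnt rest

def doit_search_alt (hand : List Int) (W : Int) : Bool :=
  match PySem.Int.mod? (hand.length : Int) W with
  | none => false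
  | some r =>
    if r ≠ 0 then false
    else
      let cnt := pvBuildCnt hand
      pvLoopB W cnt (PySem.List.sorted cnt.keys (fun k => k) false)

-- ===== PRECONDITION & SPEC =====
-- Pre_ excludes exactly the inputs on which the Python A does not return: W = 0 (ZeroDivisionError
-- on len(hand) % W) and W < 0 with a nonempty hand whose length W divides (the while loop then
-- never terminates, since range(c, c+W) is empty).  A returns normally on every admitted input.
def Pre_doit_search (hand : List Int) (W : Int) : Prop :=
  1 ≤ W ∨ (W ≤ -1 ∧ (hand = [] ∨ ¬ (W ∣ (hand.length : Int))))
instance (hand : List Int) (W : Int) : Decidable (Pre_doit_search hand W) := by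
  unfold Pre_doit_search; infer_instance

def pvWitness_doit_search : List Int × Int := ([1, 2, 3], 3)

def Spec_doit_search (hand : List Int) (W : Int) (out : Bool) : Prop := out = doit_search_alt hand W
instance (hand : List Int) (W : Int) (out : Bool) : Decidable (Spec_doit_search hand W out) := by
  unfold Spec_doit_search; infer_instance

-- ===== CLAIM (what is proved, stated in full; the proofs are below) =====
def Claim_equal_doit_search : Prop := ∀ (hand : List Int) (W : Int), Dom_doit_search hand W → Pre_doit_search hand W → Spec_doit_search hand W (doit_search hand W)

-- ===== LEMMAS AND PROOFS =====

theorem pv_find?_filter_erase (k k' : Int) : ∀ l : List (Int × Int),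
    List.find? (fun p => p.1 == k') (List.filter (fun p => !p.1 == k) l)
      = if k' = k then none else List.find? (fun p => p.1 == k') l := by
  intro l
  induction l with
  | nil => simp
  | cons p rest ih =>
    by_cases h1 : p.1 = k <;> by_cases h2 : k' = k <;> by_cases h3 : p.1 = k' <;>
      simp_all

theorem pv_get?_erase_self (d : PySem.Dict Int Int) (k : Int) :
    (d.erase k).get? k = none := by
  simp [PySem.Dict.erase, PySem.Dict.get?]

theorem pv_get?_erase_of_ne (d : PySem.Dict Int Int) {k k' : Int} (h : k' ≠ k) :
    (d.erase k).get? k' = d.get? k' := by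
  simp only [PySem.Dict.erase, PySem.Dict.get?]
  rw [pv_find?_filter_erase, if_neg h]

theorem pv_keys_erase_sublist (d : PySem.Dict Int Int) (k : Int) :
    (d.erase k).keys.Sublist d.keys := by
  simp only [PySem.Dict.erase, PySem.Dict.keys]
  exact List.Sublist.map _ List.filter_sublist

theorem pv_getD_of_not_mem (d : PySem.Dict Int Int) {k : Int} (h : k ∉ d.keys) :
    d.getD k 0 = 0 := by
  rw [PySem.Dict.getD_eq_get?_getD, (PySem.Dict.get?_eq_none_iff_not_mem_keys d k).2 h]
  rfl

theorem pv_mem_keys_of_getD_ne (d : PySem.Dict Int Int) {k : Int} (h : d.getD k 0 ≠ 0) :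
    k ∈ d.keys := by
  by_contra hk
  exact h (pv_getD_of_not_mem d hk)

theorem pv_getD_erase (d : PySem.Dict Int Int) (k k' : Int) :
    (d.erase k).getD k' 0 = if k' = k then 0 else d.getD k' 0 := by
  by_cases h : k' = k
  · simp [h, PySem.Dict.getD_eq_get?_getD, pv_get?_erase_self]
  · simp [h, PySem.Dict.getD_eq_get?_getD, pv_get?_erase_of_ne d h]

def pvInvA (d : PySem.Dict Int Int) : Prop :=
  d.keys.Nodup ∧ ∀ k ∈ d.keys, 0 < d.getD k 0

def pvStepD (d : PySem.Dict Int Int) (i : Int) : PySem.Dict Int Int :=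
  let d1 := d.insert i (d.getD i 0 - 1)
  if d1.getD i 0 = 0 then d1.erase i else d1

theorem pv_innerA_cons (d : PySem.Dict Int Int) (i : Int) (rest : List Int) :
    pvInnerA d (i :: rest)
      = if d.getD i 0 = 0 then none else pvInnerA (pvStepD d i) rest := by
  simp only [pvInnerA, pvStepD]
  by_cases h : d.getD i 0 = 0
  · simp [h]
  · simp only [if_neg h]
    split <;> rfl

theorem pv_getD_nonneg {d : PySem.Dict Int Int} (hI : pvInvA d) (k : Int) :
    0 ≤ d.getD k 0 := by
  by_cases h : k ∈ d.keys
  · exact le_of_lt (hI.2 k h)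
  · rw [pv_getD_of_not_mem d h]

theorem pv_stepD_spec {d : PySem.Dict Int Int} (hI : pvInvA d) {i : Int}
    (hv : d.getD i 0 ≠ 0) :
    pvInvA (pvStepD d i) ∧
      (∀ k, (pvStepD d i).getD k 0 = d.getD k 0 - (if k = i then 1 else 0)) := by
  have hmem : i ∈ d.keys := pv_mem_keys_of_getD_ne d hv
  have hpos : 0 < d.getD i 0 := hI.2 i hmem
  have hkeys : (d.insert i (d.getD i 0 - 1)).keys = d.keys :=
    PySem.Dict.keys_insert_of_contains d _ ((PySem.Dict.contains_iff_mem_keys d i).2 hmem)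
  have hgd : ∀ k, (d.insert i (d.getD i 0 - 1)).getD k 0
      = d.getD k 0 - (if k = i then 1 else 0) := by
    intro k
    rw [PySem.Dict.getD_insert]
    by_cases hk : k = i <;> simp [hk]
  have hI1 : (d.insert i (d.getD i 0 - 1)).keys.Nodup :=
    PySem.Dict.nodup_keys_insert _ _ _ hI.1
  unfold pvStepD
  simp only [PySem.Dict.getD_insert_self]
  by_cases hz : d.getD i 0 - 1 = 0
  · rw [if_pos hz]
    refine ⟨⟨(pv_keys_erase_sublist _ _).nodup hI1, ?_⟩, ?_⟩
    · intro k hk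
      have hki : k ≠ i := by
        intro he; subst he
        have hnone := pv_get?_erase_self (d.insert k (d.getD k 0 - 1)) k
        exact ((PySem.Dict.get?_eq_none_iff_not_mem_keys _ k).1 hnone) hk
      rw [pv_getD_erase, if_neg hki, hgd, if_neg hki]
      have hkd : k ∈ d.keys := by
        have hs := (pv_keys_erase_sublist (d.insert i (d.getD i 0 - 1)) i).mem hk
        rwa [hkeys] at hs
      have := hI.2 k hkd
      omega
    · intro k
      rw [pv_getD_erase]
      by_cases hk : k = i
      · subst hk; rw [if_pos rfl, if_pos rfl]; omega
      · rw [if_neg hk, hgd, if_neg hk]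
  · rw [if_neg hz]
    refine ⟨⟨hI1, ?_⟩, hgd⟩
    intro k hk
    rw [hkeys] at hk
    rw [hgd]
    by_cases hki : k = i
    · subst hki; simp; omega
    · have := hI.2 k hk; simp [hki]; omega

theorem pv_innerA_fail : ∀ (L : List Int) (d : PySem.Dict Int Int), pvInvA d → L.Nodup →
    (∃ i ∈ L, d.getD i 0 = 0) → pvInnerA d L = none := by
  intro L
  induction L with
  | nil => simp
  | cons i0 rest ih =>
    intro d hI hnd hex
    obtain ⟨i, hiL, hi0⟩ := hex
    rw [pv_innerA_cons]
    by_cases h0 : d.getD i0 0 = 0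
    · rw [if_pos h0]
    · rw [if_neg h0]
      have hstep := pv_stepD_spec hI h0
      have hine : i ≠ i0 := fun he => h0 (he ▸ hi0)
      have hirest : i ∈ rest := (List.mem_cons.1 hiL).resolve_left hine
      exact ih _ hstep.1 hnd.of_cons ⟨i, hirest, by simp [hstep.2 i, if_neg hine, hi0]⟩

theorem pv_innerA_ok : ∀ (L : List Int) (d : PySem.Dict Int Int), pvInvA d → L.Nodup →
    (∀ i ∈ L, d.getD i 0 ≠ 0) →
    ∃ d', pvInnerA d L = some d' ∧ pvInvA d' ∧
      (∀ k, d'.getD k 0 = d.getD k 0 - (if k ∈ L then 1 else 0)) := by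
  intro L
  induction L with
  | nil =>
    intro d hI _ _
    exact ⟨d, rfl, hI, by simp⟩
  | cons i0 rest ih =>
    intro d hI hnd hall
    have h0 : d.getD i0 0 ≠ 0 := hall i0 (List.mem_cons_self)
    have hstep := pv_stepD_spec hI h0
    have hni0 : i0 ∉ rest := (List.nodup_cons.1 hnd).1
    obtain ⟨d', hrun, hI', hpt⟩ := ih (pvStepD d i0) hstep.1 hnd.of_cons (by
      intro i hi
      rw [hstep.2 i, if_neg (fun he => by cases he; exact hni0 hi)]
      simpa using hall i (List.mem_cons_of_mem _ hi))
    refine ⟨d', ?_, hI', ?_⟩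
    · rw [pv_innerA_cons, if_neg h0]; exact hrun
    · intro k
      rw [hpt k, hstep.2 k]
      by_cases hk0 : k = i0
      · subst hk0
        simp [hni0]
      · by_cases hkr : k ∈ rest <;> simp [hk0, hkr]

theorem pv_innerB_fail (m : Int) : ∀ (L : List Int) (d : PySem.Dict Int Int), L.Nodup →
    (∃ i ∈ L, d.getD i 0 < m) → pvInnerB m d L = none := by
  intro L
  induction L with
  | nil => simp
  | cons i0 rest ih =>
    intro d hnd hex
    obtain ⟨i, hiL, hi0⟩ := hex
    by_cases h0 : d.getD i0 0 < m
    · simp [pvInnerB, h0]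
    · have hine : i ≠ i0 := fun he => h0 (he ▸ hi0)
      have hirest : i ∈ rest := (List.mem_cons.1 hiL).resolve_left hine
      simp only [pvInnerB, if_neg h0]
      exact ih _ hnd.of_cons ⟨i, hirest, by rw [PySem.Dict.getD_insert, if_neg hine]; exact hi0⟩

theorem pv_innerB_ok (m : Int) : ∀ (L : List Int) (d : PySem.Dict Int Int), L.Nodup →
    (∀ i ∈ L, m ≤ d.getD i 0) →
    ∃ d', pvInnerB m d L = some d' ∧
      (∀ k, d'.getD k 0 = d.getD k 0 - m * (if k ∈ L then 1 else 0)) := by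
  intro L
  induction L with
  | nil =>
    intro d _ _
    exact ⟨d, rfl, by simp⟩
  | cons i0 rest ih =>
    intro d hnd hall
    have h0 : ¬ d.getD i0 0 < m := not_lt.2 (hall i0 List.mem_cons_self)
    have hni0 : i0 ∉ rest := (List.nodup_cons.1 hnd).1
    obtain ⟨d', hrun, hpt⟩ := ih (d.insert i0 (d.getD i0 0 - m)) hnd.of_cons (by
      intro i hi
      rw [PySem.Dict.getD_insert, if_neg (fun he => by cases he; exact hni0 hi)]
      exact hall i (List.mem_cons_of_mem _ hi))
    refine ⟨d', ?_, ?_⟩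
    · simp only [pvInnerB, if_neg h0]; exact hrun
    · intro k
      rw [hpt k, PySem.Dict.getD_insert]
      by_cases hk0 : k = i0
      · subst hk0; simp [hni0]
      · by_cases hkr : k ∈ rest <;> simp [hk0, hkr]

theorem pv_loopB_skip (W : Int) :
    ∀ (as : List Int) (d : PySem.Dict Int Int) (ks : List Int),
    (∀ a ∈ as, d.getD a 0 ≤ 0) →
    pvLoopB W d (as ++ ks) = pvLoopB W d ks := by
  intro as
  induction as with
  | nil => intro d ks _; rfl
  | cons a rest ih =>
    intro d ks hz
    have ha : ¬ 0 < d.getD a 0 := not_lt.2 (hz a List.mem_cons_self)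
    simp only [List.cons_append, pvLoopB, if_neg ha]
    exact ih d ks (fun b hb => hz b (List.mem_cons_of_mem _ hb))

theorem pv_minA {d : PySem.Dict Int Int} {c : Int} (hI : pvInvA d)
    (hc : d.getD c 0 ≠ 0) (hmin : ∀ k, d.getD k 0 ≠ 0 → c ≤ k) :
    PySem.List.min? d.keys (fun k => k) = some c := by
  have hcm : c ∈ d.keys := pv_mem_keys_of_getD_ne d hc
  have hne : d.keys ≠ [] := fun h => by simp [h] at hcm
  cases hmq : PySem.List.min? d.keys (fun k => k) with
  | none => exact absurd ((PySem.List.min?_eq_none_iff _ _).1 hmq) hne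
  | some m =>
    have hmmem : m ∈ d.keys := PySem.List.min?_mem hmq
    have h1 : m ≤ c := PySem.List.min?_isMin hmq c hcm
    have h2 : c ≤ m := hmin m (ne_of_gt (hI.2 m hmmem))
    rw [le_antisymm h1 h2]

theorem pv_loopA_succ (W : Int) (f : Nat) (d : PySem.Dict Int Int) :
    pvLoopA W (f+1) d
      = match PySem.List.min? d.keys (fun k => k) with
        | none => true
        | some c =>
          match pvInnerA d (PySem.List.pyRange c (c + W) 1) with
          | none => false
          | some d' => pvLoopA W f d' := rfl

theorem pv_loopA_succ_some (W : Int) (f : Nat) (d : PySem.Dict Int Int) {c : Int}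
    (h : PySem.List.min? d.keys (fun k => k) = some c) :
    pvLoopA W (f+1) d
      = match pvInnerA d (PySem.List.pyRange c (c + W) 1) with
        | none => false
        | some d' => pvLoopA W f d' := by
  rw [pv_loopA_succ, h]

theorem pv_loopA_none (W : Int) (fuel : Nat) (d : PySem.Dict Int Int)
    (h : PySem.List.min? d.keys (fun k => k) = none) :
    pvLoopA W fuel d = true := by
  cases fuel with
  | zero => rfl
  | succ f => rw [pv_loopA_succ, h]

theorem pv_loopB_cons (W : Int) (d : PySem.Dict Int Int) (x : Int) (rest : List Int) :
    pvLoopB W d (x :: rest)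
      = if 0 < d.getD x 0 then
          (match pvInnerB (d.getD x 0) d (PySem.List.pyRange x (x + W) 1) with
            | none => false
            | some d' => pvLoopB W d' rest)
        else pvLoopB W d rest := rfl

theorem pv_A_fail (W : Int) (hW : 1 ≤ W) (c : Int) :
    ∀ (mN : Nat) (d : PySem.Dict Int Int) (fuel : Nat), pvInvA d → 0 < mN →
    (∀ k, d.getD k 0 ≠ 0 → c ≤ k) → d.getD c 0 = (mN : Int) → mN ≤ fuel →
    (∃ i ∈ PySem.List.pyRange c (c + W) 1, d.getD i 0 < (mN : Int)) →
    pvLoopA W fuel d = false := by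
  intro mN
  induction mN with
  | zero => intro d fuel _ h; omega
  | succ n ih =>
    intro d fuel hI _ hmin hgc hfuel hex
    obtain ⟨f, rfl⟩ : ∃ f, fuel = f + 1 := ⟨fuel - 1, by omega⟩
    have hc0 : d.getD c 0 ≠ 0 := by rw [hgc]; push_cast; omega
    have hndL : (PySem.List.pyRange c (c + W) 1).Nodup := PySem.List.nodup_pyRange_one _ _
    rw [pv_loopA_succ_some W f d (pv_minA hI hc0 hmin)]
    by_cases hz : ∃ i ∈ PySem.List.pyRange c (c + W) 1, d.getD i 0 = 0
    · rw [pv_innerA_fail _ d hI hndL hz]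
    · push_neg at hz
      obtain ⟨d1, hrun, hI1, hpt⟩ := pv_innerA_ok _ d hI hndL hz
      rw [hrun]
      obtain ⟨i, hiL, hilt⟩ := hex
      have hipos : 0 < d.getD i 0 := lt_of_le_of_ne (pv_getD_nonneg hI i) (Ne.symm (hz i hiL))
      have hn : 0 < n := by push_cast at hilt ⊢; omega
      have hcL : c ∈ PySem.List.pyRange c (c + W) 1 :=
        (PySem.List.mem_pyRange_one).2 ⟨le_refl c, by omega⟩
      apply ih d1 f hI1 hn
      · intro k hk
        rw [hpt k] at hk
        by_cases hkL : k ∈ PySem.List.pyRange c (c + W) 1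
        · exact ((PySem.List.mem_pyRange_one).1 hkL).1
        · simp [hkL] at hk; exact hmin k hk
      · rw [hpt c, if_pos hcL, hgc]; push_cast; ring
      · omega
      · refine ⟨i, hiL, ?_⟩
        rw [hpt i, if_pos hiL]
        push_cast at hilt ⊢; omega

theorem pv_A_ok (W : Int) (hW : 1 ≤ W) (c : Int) :
    ∀ (mN : Nat) (d : PySem.Dict Int Int) (fuel : Nat), pvInvA d → 0 < mN →
    (∀ k, d.getD k 0 ≠ 0 → c ≤ k) → d.getD c 0 = (mN : Int) →
    (∀ i ∈ PySem.List.pyRange c (c + W) 1, (mN : Int) ≤ d.getD i 0) →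
    ∃ d', pvInvA d' ∧
      (∀ k, d'.getD k 0 = d.getD k 0 - (mN : Int) * (if k ∈ PySem.List.pyRange c (c + W) 1 then 1 else 0)) ∧
      pvLoopA W (fuel + mN) d = pvLoopA W fuel d' := by
  intro mN
  induction mN with
  | zero => intro d fuel _ h; omega
  | succ n ih =>
    intro d fuel hI _ hmin hgc hall
    have hc0 : d.getD c 0 ≠ 0 := by rw [hgc]; push_cast; omega
    have hndL : (PySem.List.pyRange c (c + W) 1).Nodup := PySem.List.nodup_pyRange_one _ _
    have hz : ∀ i ∈ PySem.List.pyRange c (c + W) 1, d.getD i 0 ≠ 0 := by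
      intro i hi
      have := hall i hi; push_cast at this; omega
    obtain ⟨d1, hrun, hI1, hpt⟩ := pv_innerA_ok _ d hI hndL hz
    have hround : pvLoopA W ((fuel + n) + 1) d = pvLoopA W (fuel + n) d1 := by
      rw [pv_loopA_succ_some W (fuel+n) d (pv_minA hI hc0 hmin), hrun]
    by_cases hn : n = 0
    · subst hn
      refine ⟨d1, hI1, ?_, hround⟩
      intro k
      rw [hpt k]
      by_cases hkL : k ∈ PySem.List.pyRange c (c + W) 1 <;> simp [hkL]
    · have hn' : 0 < n := Nat.pos_of_ne_zero hn
      have hcL : c ∈ PySem.List.pyRange c (c + W) 1 :=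
        (PySem.List.mem_pyRange_one).2 ⟨le_refl c, by omega⟩
      obtain ⟨d', hI', hpt', hloop⟩ := ih d1 fuel hI1 hn'
        (by
          intro k hk
          rw [hpt k] at hk
          by_cases hkL : k ∈ PySem.List.pyRange c (c + W) 1
          · exact ((PySem.List.mem_pyRange_one).1 hkL).1
          · simp [hkL] at hk; exact hmin k hk)
        (by rw [hpt c, if_pos hcL, hgc]; push_cast; ring)
        (by
          intro i hi
          rw [hpt i, if_pos hi]
          have := hall i hi; push_cast at this ⊢; omega)
      refine ⟨d', hI', ?_, ?_⟩
      · intro k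
        rw [hpt' k, hpt k]
        by_cases hkL : k ∈ PySem.List.pyRange c (c + W) 1
        · simp [hkL]; ring
        · simp [hkL]
      · rw [show fuel + (n+1) = (fuel + n) + 1 from rfl, hround, hloop]

def pvS (K0 : List Int) (d : PySem.Dict Int Int) : Nat :=
  (K0.map (fun k => (d.getD k 0).toNat)).sum

theorem pv_mem_le_S {K0 : List Int} {c : Int} (hc : c ∈ K0) (d : PySem.Dict Int Int) :
    (d.getD c 0).toNat ≤ pvS K0 d := by
  obtain ⟨u, v, rfl⟩ := List.append_of_mem hc
  simp only [pvS, List.map_append, List.map_cons, List.sum_append, List.sum_cons]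
  omega

theorem pv_S_drop {K0 : List Int} {c : Int} (hc : c ∈ K0)
    {d d' : PySem.Dict Int Int}
    (hle : ∀ k, (d'.getD k 0).toNat ≤ (d.getD k 0).toNat)
    (hzero : d'.getD c 0 = 0) :
    pvS K0 d' + (d.getD c 0).toNat ≤ pvS K0 d := by
  obtain ⟨u, v, rfl⟩ := List.append_of_mem hc
  simp only [pvS, List.map_append, List.map_cons, List.sum_append, List.sum_cons, hzero]
  have hu : ((u.map (fun k => (d'.getD k 0).toNat)).sum ≤ (u.map (fun k => (d.getD k 0).toNat)).sum) :=
    List.sum_le_sum (fun i _ => hle i)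
  have hv : ((v.map (fun k => (d'.getD k 0).toNat)).sum ≤ (v.map (fun k => (d.getD k 0).toNat)).sum) :=
    List.sum_le_sum (fun i _ => hle i)
  omega

theorem pv_main (W : Int) (hW : 1 ≤ W) (K0 : List Int) :
    ∀ (fuel : Nat) (dA dB : PySem.Dict Int Int) (ks : List Int),
    pvInvA dA →
    (∀ k, dA.getD k 0 ≠ 0 → k ∈ K0) →
    (∀ k, dA.getD k 0 = dB.getD k 0) →
    ks.Pairwise (· < ·) →
    (∀ k, dB.getD k 0 ≠ 0 → k ∈ ks) →
    pvS K0 dA ≤ fuel →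
    pvLoopA W fuel dA = pvLoopB W dB ks := by
  intro fuel
  induction fuel using Nat.strong_induction_on with
  | _ fuel IH =>
  intro dA dB ks hI hsupK hR hsorted hsupks hfuel
  cases hm : PySem.List.min? dA.keys (fun k => k) with
  | none =>
    have hkeys : dA.keys = [] := (PySem.List.min?_eq_none_iff _ _).1 hm
    have hzero : ∀ k, dA.getD k 0 = 0 := fun k =>
      pv_getD_of_not_mem dA (by rw [hkeys]; exact List.not_mem_nil)
    rw [pv_loopA_none W fuel dA hm]
    have hskip := pv_loopB_skip W ks dB []
      (fun a _ => by rw [← hR a, hzero a])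
    rw [List.append_nil] at hskip
    rw [hskip]
    rfl
  | some c =>
    have hcm : c ∈ dA.keys := PySem.List.min?_mem hm
    have hcpos : 0 < dA.getD c 0 := hI.2 c hcm
    have hmin : ∀ k, dA.getD k 0 ≠ 0 → c ≤ k := fun k hk =>
      PySem.List.min?_isMin hm k (pv_mem_keys_of_getD_ne dA hk)
    set L := PySem.List.pyRange c (c + W) 1 with hL
    have hndL : L.Nodup := PySem.List.nodup_pyRange_one _ _
    have hcL : c ∈ L := (PySem.List.mem_pyRange_one).2 ⟨le_refl c, by omega⟩
    set mN : Nat := (dA.getD c 0).toNat with hmN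
    have hcast : (mN : Int) = dA.getD c 0 := Int.toNat_of_nonneg (le_of_lt hcpos)
    have hmNpos : 0 < mN := by omega
    have hcK0 : c ∈ K0 := hsupK c (ne_of_gt hcpos)
    have hmNfuel : mN ≤ fuel := le_trans (pv_mem_le_S hcK0 dA) hfuel
    have hcks : c ∈ ks := hsupks c (by rw [← hR c]; exact ne_of_gt hcpos)
    obtain ⟨as, bs, rfl⟩ := List.append_of_mem hcks
    have hpair := List.pairwise_append.1 hsorted
    have haszero : ∀ a ∈ as, dB.getD a 0 ≤ 0 := by
      intro a ha
      have hac : a < c := hpair.2.2 a ha c List.mem_cons_self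
      rw [← hR a]
      by_contra hgt
      have : dA.getD a 0 ≠ 0 := by omega
      exact absurd (hmin a this) (not_le.2 hac)
    rw [pv_loopB_skip W as dB (c :: bs) haszero, pv_loopB_cons,
        if_pos (by rw [← hR c]; exact hcpos)]
    by_cases hfail : ∃ i ∈ L, dA.getD i 0 < dA.getD c 0
    · rw [pv_A_fail W hW c mN dA fuel hI hmNpos hmin hcast.symm hmNfuel
        (by obtain ⟨i, hi, hlt⟩ := hfail; exact ⟨i, hi, by rw [hcast]; exact hlt⟩)]
      rw [pv_innerB_fail (dB.getD c 0) L dB hndL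
        (by obtain ⟨i, hi, hlt⟩ := hfail; exact ⟨i, hi, by rw [← hR i, ← hR c]; exact hlt⟩)]
    · push_neg at hfail
      obtain ⟨d', hI', hpt', hloop⟩ := pv_A_ok W hW c mN dA (fuel - mN) hI hmNpos hmin hcast.symm
        (fun i hi => by rw [hcast]; exact hfail i hi)
      obtain ⟨dB', hrunB, hptB⟩ := pv_innerB_ok (dB.getD c 0) L dB hndL
        (fun i hi => by rw [← hR i, ← hR c]; exact hfail i hi)
      rw [hrunB]
      have hfuel_eq : fuel - mN + mN = fuel := by omega
      rw [← hfuel_eq, hloop]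
      apply IH (fuel - mN) (by omega) d' dB' bs hI'
      · intro k hk
        rw [hpt' k] at hk
        apply hsupK
        intro h0
        rw [h0] at hk
        by_cases hkL : k ∈ L
        · have := hfail k hkL; rw [h0] at this
          rw [if_pos hkL] at hk; omega
        · rw [if_neg hkL] at hk; simp at hk
      · intro k
        rw [hpt' k, hptB k, hR k, ← hR c, ← hcast]
      · exact (hpair.2.1).of_cons
      · intro k hk
        rw [hptB k] at hk
        have hkdB : dB.getD k 0 ≠ 0 := by
          intro h0
          rw [h0] at hk
          by_cases hkL : k ∈ L
          · have := hfail k hkL; rw [hR k, h0] at this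
            have hcpos' := hcpos; rw [hR c] at hcpos'
            omega
          · rw [if_neg hkL] at hk; simp at hk
        have hkks := hsupks k hkdB
        rcases List.mem_append.1 hkks with hka | hkcbs
        · exfalso
          have h1 := haszero k hka
          have h2 : 0 ≤ dB.getD k 0 := by rw [← hR k]; exact pv_getD_nonneg hI k
          exact hkdB (le_antisymm h1 h2)
        · rcases List.mem_cons.1 hkcbs with rfl | hkbs
          · exfalso
            rw [if_pos hcL, ← hR k] at hk
            simp at hk
          · exact hkbs
      · have hle : ∀ k, (d'.getD k 0).toNat ≤ (dA.getD k 0).toNat := by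
          intro k
          rw [hpt' k]
          by_cases hkL : k ∈ L
          · rw [if_pos hkL]; omega
          · rw [if_neg hkL]; simp
        have hzero' : d'.getD c 0 = 0 := by
          rw [hpt' c, if_pos hcL, ← hcast]; ring
        have := pv_S_drop hcK0 hle hzero'
        omega

theorem pv_buildCnt_getD (hand : List Int) (k : Int) :
    (pvBuildCnt hand).getD k 0 = (hand.count k : Int) := by
  unfold pvBuildCnt
  rw [PySem.Dict.getD_foldl_insert_add_one, PySem.Dict.getD_empty]
  simp [List.count]

theorem pv_buildCnt_keys (hand : List Int) :
    (pvBuildCnt hand).keys = PySem.Set.ofList hand := by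
  unfold pvBuildCnt
  rw [PySem.Dict.keys_foldl_insert, PySem.Dict.keys_empty, PySem.Set.update_nil_left]

theorem pv_buildCnt_inv (hand : List Int) : pvInvA (pvBuildCnt hand) := by
  constructor
  · exact PySem.Dict.nodup_keys_foldl_insert _ _ _ PySem.Dict.nodup_keys_empty
  · intro k hk
    rw [pv_buildCnt_keys, PySem.Set.mem_ofList] at hk
    rw [pv_buildCnt_getD]
    exact_mod_cast List.count_pos_iff.2 hk

theorem pv_S_init (hand : List Int) :
    pvS (pvBuildCnt hand).keys (pvBuildCnt hand) = hand.length := by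
  unfold pvS
  rw [pv_buildCnt_keys]
  have hmap : (PySem.Set.ofList hand).map (fun k => ((pvBuildCnt hand).getD k 0).toNat)
      = (PySem.Set.ofList hand).map (fun k => List.count k hand) := by
    apply List.map_congr_left
    intro k _
    rw [pv_buildCnt_getD]
    simp [List.count]
  rw [hmap]
  have hperm : (PySem.Set.ofList hand).Perm hand.dedup :=
    (List.perm_ext_iff_of_nodup (PySem.Set.nodup_ofList hand) hand.nodup_dedup).2
      (fun a => by rw [PySem.Set.mem_ofList, List.mem_dedup])
  rw [(hperm.map _).sum_eq]
  exact List.sum_map_count_dedup_eq_length hand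

-- ===== VERDICT (by name: the statement is the Claim_ definition above) =====
theorem doit_search_spec : Claim_equal_doit_search := by
  intro hand W _ hpre
  unfold Spec_doit_search
  have hW0 : W ≠ 0 := by rcases hpre with h | ⟨h, _⟩ <;> omega
  unfold doit_search doit_search_alt
  rw [show PySem.Int.mod? (hand.length : Int) W
      = some (PySem.Int.mod (hand.length : Int) W) from by
    simp [PySem.Int.mod?, PySem.Int.mod, hW0]]
  by_cases hr : PySem.Int.mod (hand.length : Int) W = 0
  · simp only [hr, ne_eq, not_true_eq_false, if_false]
    rcases hpre with hW | ⟨hWneg, hcase⟩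
    · -- the real case: W ≥ 1
      apply pv_main W hW (pvBuildCnt hand).keys _ (pvBuildCnt hand) (pvBuildCnt hand)
        _ (pv_buildCnt_inv hand)
        (fun k hk => pv_mem_keys_of_getD_ne _ hk)
        (fun k => rfl)
        (by rw [pv_buildCnt_keys]; exact PySem.List.sorted_ofList_pairwise_lt hand)
        (fun k hk => (PySem.List.mem_sorted _ _ _ k).2 (pv_mem_keys_of_getD_ne _ hk))
        (by rw [pv_S_init]; omega)
    · -- W ≤ -1 and A happens to return before looping
      rcases hcase with rfl | hnd
      · rw [pv_loopA_none W _ _ (by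
          rw [(PySem.List.min?_eq_none_iff _ _)]
          show (pvBuildCnt []).keys = []
          rw [pv_buildCnt_keys]; rfl)]
        rw [show PySem.List.sorted (pvBuildCnt ([]:List Int)).keys (fun k => k) false = [] from by
          rw [(PySem.List.sorted_eq_nil_iff _ _ _), pv_buildCnt_keys]; rfl]
        rfl
      · exact absurd ((PySem.Int.mod_eq_zero_iff_dvd _ _).1 hr) hnd
  · simp [hr]
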